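-- pv_equiv track=rewrite | github.com/A7med-Khedr/problem-solving | x-iterations-string/app.py | string_func
-- ===== SOURCE A (Python) =====
-- def string_func(s, x):
--     n = len(s)
--
--     if n <= 1 or x == 0:
--         return s
--
--     def next_pos(i):
--         if i < n // 2:
--             return 2 * i + 1
--         return 2 * (n - 1 - i)
--
--     res = [''] * n
--     visited = bytearray(n)
--
--     for start in range(n):
--         if visited[start]:
--             continue
--
--         cycle = []
--         cur = start
--
--         while not visited[cur]:
--             visited[cur] = 1
--             cycle.append(cur)
--             cur = next_pos(cur)
--
--         m = len(cycle)
--         shift = x % m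
--
--         for idx, old_index in enumerate(cycle):
--             new_index = cycle[(idx + shift) % m]
--             res[new_index] = s[old_index]
--
--     return ''.join(res)
-- ===== SOURCE B (Python) =====
-- def string_func(s, x):
--     n = len(s)
--     if n <= 1 or x == 0:
--         return s
--     half = n // 2
--     perm = [2 * i + 1 if i < half else 2 * (n - 1 - i) for i in range(n)]
--     if x > 0:
--         # gather form needs the inverse step: out[j] = s[step^-x (j)]
--         inv = [0] * n
--         for i in range(n):
--             inv[perm[i]] = i
--         base, e = inv, x
--     else:
--         base, e = perm, -x
--     # binary exponentiation of the permutation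
--     acc = list(range(n))
--     while e:
--         if e % 2 == 1:
--             acc = [base[a] for a in acc]
--         base = [base[b] for b in base]
--         e //= 2
--     return ''.join(s[a] for a in acc)
-- ===== Notes on version B (the rewrite author's own statement) =====
-- stated objective: alternative
-- what changed: Replaces A's cycle decomposition (visited array, per-cycle shift x%m) by building the one-step permutation table and raising it to the x-th power with binary exponentiation (inverse table for positive x, since the result is gathered), then gathering the output in one comprehension.
import Mathlib
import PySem

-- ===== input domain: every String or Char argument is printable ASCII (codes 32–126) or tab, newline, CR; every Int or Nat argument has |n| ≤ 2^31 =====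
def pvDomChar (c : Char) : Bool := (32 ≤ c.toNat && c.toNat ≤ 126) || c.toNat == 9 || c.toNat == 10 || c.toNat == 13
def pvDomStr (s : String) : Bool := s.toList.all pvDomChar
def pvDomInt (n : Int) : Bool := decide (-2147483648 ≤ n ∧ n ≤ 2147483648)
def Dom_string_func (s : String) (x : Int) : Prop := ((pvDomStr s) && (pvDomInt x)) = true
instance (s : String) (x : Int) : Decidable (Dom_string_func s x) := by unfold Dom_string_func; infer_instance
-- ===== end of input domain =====

-- B replaces A's cycle decomposition by binary exponentiation of the index permutation
-- (inverse table for positive x, gather at the end); objective: alternative algorithm, equal value proved.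

-- ===== PORT A =====
-- next_pos(i) of A (n is captured in Python; an explicit argument here)
def pvNextPos (n i : Nat) : Nat := if i < n / 2 then 2 * i + 1 else 2 * (n - 1 - i)

-- termination measure fact for the while loop (cited by pvCollect's decreasing_by)
theorem pv_count_set_lt (l : List Bool) (i : Nat) (h : l.getD i true = false) :
    (l.set i true).count false < l.count false := by
  induction l generalizing i with
  | nil => simp [List.getD] at h
  | cons a t ih =>
    cases i with
    | zero =>
      simp [List.getD] at h
      subst h
      simp [List.set, List.count_cons]
    | succ j =>
      have h' : t.getD j true = false := by simpa [List.getD] using h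
      have := ih j h'
      simp [List.set, List.count_cons]
      omega

-- the inner `while not visited[cur]` loop of A: marks and collects the cycle.
-- visited[cur] is ported as getD with default true: cur is always < len(visited) when A runs.
def pvCollect (f : Nat → Nat) (visited : List Bool) (cycle : List Nat) (cur : Nat) :
    List Bool × List Nat :=
  if h : visited.getD cur true = false then
    pvCollect f (visited.set cur true) (cycle ++ [cur]) (f cur)
  else (visited, cycle)
termination_by visited.count false
decreasing_by exact pv_count_set_lt visited cur h

-- one iteration of A's `for start in range(n)` loop; state = (res, visited).
-- shift = x % m is nonnegative (m = len(cycle) ≥ 1), so its toNat is exact, and the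
-- Nat mod (idx+shift) % m agrees with Python's; all list indices are provably in range (getD).
def pvStepA (f : Nat → Nat) (chars : List Char) (x : Int)
    (st : List (List Char) × List Bool) (start : Nat) : List (List Char) × List Bool :=
  if st.2.getD start true then st
  else
    let pr := pvCollect f st.2 [] start
    let cycle := pr.2
    let m := cycle.length
    let shift := (PySem.Int.mod x (m : Int)).toNat
    let res' := cycle.zipIdx.foldl
      (fun r p => r.set (cycle.getD ((p.2 + shift) % m) 0) [chars.getD p.1 ' ']) st.1
    (res', pr.1)

def string_func (s : String) (x : Int) : String :=
  let chars := s.toList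
  let n := chars.length
  if n ≤ 1 ∨ x = 0 then s
  else
    let st := (List.range n).foldl (pvStepA (pvNextPos n) chars x)
      (List.replicate n ([] : List Char), List.replicate n false)
    String.mk st.1.flatten

-- ===== PORT B =====
-- base[a] ported as getD 0: every entry of acc/base stays < n (a permutation table).
def pvComp (t u : List Nat) : List Nat := u.map (fun v => t.getD v 0)

-- the `while e:` binary-exponentiation loop of B
def pvBpow (base acc : List Nat) (e : Nat) : List Nat :=
  if h : e = 0 then acc
  else pvBpow (pvComp base base) (if e % 2 = 1 then pvComp base acc else acc) (e / 2)
termination_by e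
decreasing_by exact Nat.div_lt_self (Nat.pos_of_ne_zero h) one_lt_two

def string_func_alt (s : String) (x : Int) : String :=
  let chars := s.toList
  let n := chars.length
  if n ≤ 1 ∨ x = 0 then s
  else
    let perm := (List.range n).map (fun i => if i < n / 2 then 2 * i + 1 else 2 * (n - 1 - i))
    let be : List Nat × Nat :=
      if 0 < x then
        ((List.range n).foldl (fun t i => t.set (perm.getD i 0) i) (List.replicate n 0), x.toNat)
      else (perm, (-x).toNat)
    let acc := pvBpow be.1 (List.range n) be.2
    String.mk (acc.map (fun a => chars.getD a ' '))

-- ===== PRECONDITION & SPEC =====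
def Spec_string_func (s : String) (x : Int) (out : String) : Prop := out = string_func_alt s x
instance (s : String) (x : Int) (out : String) : Decidable (Spec_string_func s x out) := by unfold Spec_string_func; infer_instance

-- ===== CLAIM (what is proved, stated in full; the proofs are below) =====
def Claim_equal_string_func : Prop := ∀ (s : String) (x : Int), Dom_string_func s x → Spec_string_func s x (string_func s x)

-- ===== LEMMAS AND PROOFS =====

-- ---------- the inverse step and basic facts about pvNextPos ----------
def pvPrev (n j : Nat) : Nat := if j % 2 = 1 then j / 2 else n - 1 - j / 2

theorem pvNext_lt {n i : Nat} (hn : 2 ≤ n) (h : i < n) : pvNextPos n i < n := by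
  simp only [pvNextPos]; split_ifs <;> omega

theorem pvPrev_lt {n j : Nat} (hn : 2 ≤ n) (h : j < n) : pvPrev n j < n := by
  simp only [pvPrev]; split_ifs <;> omega

theorem pvPrev_next {n i : Nat} (h : i < n) : pvPrev n (pvNextPos n i) = i := by
  simp only [pvPrev, pvNextPos]; split_ifs <;> omega

theorem pvNext_prev {n j : Nat} (h : j < n) : pvNextPos n (pvPrev n j) = j := by
  simp only [pvPrev, pvNextPos]; split_ifs <;> omega

theorem pvIter_next_lt {n : Nat} (hn : 2 ≤ n) (k : Nat) {i : Nat} (h : i < n) :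
    (pvNextPos n)^[k] i < n := by
  induction k generalizing i with
  | zero => simpa using h
  | succ k ih => rw [Function.iterate_succ_apply]; exact ih (pvNext_lt hn h)

theorem pvIter_prev_lt {n : Nat} (hn : 2 ≤ n) (k : Nat) {j : Nat} (h : j < n) :
    (pvPrev n)^[k] j < n := by
  induction k generalizing j with
  | zero => simpa using h
  | succ k ih => rw [Function.iterate_succ_apply]; exact ih (pvPrev_lt hn h)

theorem pvCancelGF {n : Nat} (hn : 2 ≤ n) (k : Nat) {i : Nat} (h : i < n) :
    (pvPrev n)^[k] ((pvNextPos n)^[k] i) = i := by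
  induction k generalizing i with
  | zero => simp
  | succ k ih =>
    rw [Function.iterate_succ_apply (pvPrev n), Function.iterate_succ_apply' (pvNextPos n)]
    rw [pvPrev_next (pvIter_next_lt hn k h)]
    exact ih h

theorem pvCancelFG {n : Nat} (hn : 2 ≤ n) (k : Nat) {j : Nat} (h : j < n) :
    (pvNextPos n)^[k] ((pvPrev n)^[k] j) = j := by
  induction k generalizing j with
  | zero => simp
  | succ k ih =>
    rw [Function.iterate_succ_apply (pvNextPos n), Function.iterate_succ_apply' (pvPrev n)]
    rw [pvNext_prev (pvIter_prev_lt hn k h)]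
    exact ih h

-- iterate a fixed multiple of a period
theorem pvIter_mul_fix {φ : Nat → Nat} {m i : Nat} (h : φ^[m] i = i) (k : Nat) :
    φ^[k * m] i = i := by
  induction k with
  | zero => simp
  | succ k ih => rw [Nat.succ_mul, Function.iterate_add_apply, h, ih]

theorem pvIter_mod_period {n : Nat} {m i : Nat} (h : (pvNextPos n)^[m] i = i)
    {a b : Nat} (hab : a % m = b % m) :
    (pvNextPos n)^[a] i = (pvNextPos n)^[b] i := by
  rcases Nat.eq_zero_or_pos m with hm | hm
  · subst hm; simp at hab; rw [hab]
  · have ha := Nat.mod_add_div' a m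
    have hb := Nat.mod_add_div' b m
    rw [← ha, ← hb] at *
    rw [Function.iterate_add_apply, Function.iterate_add_apply,
      pvIter_mul_fix h, pvIter_mul_fix h, hab]

-- every point of [0,n) is periodic (pigeonhole)
theorem pvExists_period {n i : Nat} (hn : 2 ≤ n) (h : i < n) :
    ∃ m, 0 < m ∧ (pvNextPos n)^[m] i = i := by
  have hmaps : ∀ k ∈ Finset.range (n + 1), (pvNextPos n)^[k] i ∈ Finset.range n := by
    intro k _; exact Finset.mem_range.2 (pvIter_next_lt hn k h)
  have hcard : (Finset.range n).card < (Finset.range (n + 1)).card := by simp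
  obtain ⟨a, _, b, _, hne, heq⟩ :=
    Finset.exists_ne_map_eq_of_card_lt_of_maps_to hcard hmaps
  rcases Nat.lt_or_ge a b with hab | hab
  · refine ⟨b - a, by omega, ?_⟩
    have : (pvNextPos n)^[a] ((pvNextPos n)^[b - a] i) = (pvNextPos n)^[a] i := by
      rw [← Function.iterate_add_apply]
      have : a + (b - a) = b := by omega
      rw [this, heq]
    have h2 := congrArg ((pvPrev n)^[a]) this
    rwa [pvCancelGF hn a (pvIter_next_lt hn _ h), pvCancelGF hn a h] at h2
  · have hba : b < a := by omega
    refine ⟨a - b, by omega, ?_⟩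
    have : (pvNextPos n)^[b] ((pvNextPos n)^[a - b] i) = (pvNextPos n)^[b] i := by
      rw [← Function.iterate_add_apply]
      have : b + (a - b) = a := by omega
      rw [this, heq]
    have h2 := congrArg ((pvPrev n)^[b]) this
    rwa [pvCancelGF hn b (pvIter_next_lt hn _ h), pvCancelGF hn b h] at h2

-- the minimal period
def pvPer (n i : Nat) : Nat :=
  if h : 2 ≤ n ∧ i < n then Nat.find (pvExists_period h.1 h.2) else 1

theorem pvPer_spec {n i : Nat} (hn : 2 ≤ n) (h : i < n) :
    0 < pvPer n i ∧ (pvNextPos n)^[pvPer n i] i = i := by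
  rw [pvPer, dif_pos ⟨hn, h⟩]; exact Nat.find_spec (pvExists_period hn h)

theorem pvPer_min {n i : Nat} (hn : 2 ≤ n) (h : i < n) {k : Nat} (hk : k < pvPer n i) :
    ¬ (0 < k ∧ (pvNextPos n)^[k] i = i) := by
  rw [pvPer, dif_pos ⟨hn, h⟩] at hk; exact Nat.find_min (pvExists_period hn h) hk

theorem pvPer_dvd {n i : Nat} (hn : 2 ≤ n) (h : i < n) {m : Nat} (hm : 0 < m)
    (hfix : (pvNextPos n)^[m] i = i) : pvPer n i ∣ m := by
  obtain ⟨hp, hfixp⟩ := pvPer_spec hn h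
  have hr : (pvNextPos n)^[m % pvPer n i] i = i := by
    have : m % pvPer n i + m / pvPer n i * pvPer n i = m := Nat.mod_add_div' m (pvPer n i)
    calc (pvNextPos n)^[m % pvPer n i] i
        = (pvNextPos n)^[m % pvPer n i] ((pvNextPos n)^[m / pvPer n i * pvPer n i] i) := by
          rw [pvIter_mul_fix hfixp]
      _ = i := by rw [← Function.iterate_add_apply, this, hfix]
  rcases Nat.eq_zero_or_pos (m % pvPer n i) with h0 | h0
  · exact Nat.dvd_of_mod_eq_zero h0
  · exact absurd ⟨h0, hr⟩ (pvPer_min hn h (Nat.mod_lt _ hp))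

-- ---------- the write map of A and the gather map of B ----------
def pvQA (n : Nat) (x : Int) (i : Nat) : Nat :=
  (pvNextPos n)^[(PySem.Int.mod x (pvPer n i : Int)).toNat] i

def pvHB (n : Nat) (x : Int) (j : Nat) : Nat :=
  if 0 < x then (pvPrev n)^[x.toNat] j else (pvNextPos n)^[(-x).toNat] j


theorem pvEdiv_nonpos {x p : Int} (hx : x < 0) (hp : 0 < p) : x / p ≤ 0 := by
  have h0 := Int.emod_def x p
  have h1 : 0 ≤ x % p := Int.emod_nonneg x hp.ne'
  have h2 : x % p < p := Int.emod_lt_of_pos x hp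
  nlinarith [sq_nonneg (x / p)]

theorem pvMod_toNat_cast {x : Int} {m : Nat} (hm : 0 < m) :
    ((PySem.Int.mod x (m : Int)).toNat : Int) = x % (m : Int) := by
  rw [PySem.Int.mod_eq_emod_of_pos (by exact_mod_cast hm)]
  exact Int.toNat_of_nonneg (Int.emod_nonneg x (by exact_mod_cast hm.ne'))

-- A's per-cycle shift x % m gives the same write position as the canonical one via pvPer
theorem pvQA_eq_of_period {n i : Nat} (hn : 2 ≤ n) (h : i < n) {m : Nat} (hm : 0 < m)
    (hfix : (pvNextPos n)^[m] i = i) (x : Int) :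
    (pvNextPos n)^[(PySem.Int.mod x (m : Int)).toNat] i = pvQA n x i := by
  obtain ⟨hp, hfixp⟩ := pvPer_spec hn h
  have hdvd : pvPer n i ∣ m := pvPer_dvd hn h hm hfix
  apply pvIter_mod_period hfixp
  apply Nat.cast_injective (R := Int)
  push_cast
  rw [pvMod_toNat_cast hm, pvMod_toNat_cast hp]
  rw [Int.emod_emod_of_dvd x (by exact_mod_cast hdvd)]
  rw [Int.emod_emod_of_dvd x dvd_rfl]

theorem pvQA_lt {n i : Nat} (hn : 2 ≤ n) (h : i < n) (x : Int) : pvQA n x i < n :=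
  pvIter_next_lt hn _ h

theorem pvHB_lt {n j : Nat} (hn : 2 ≤ n) (h : j < n) (x : Int) : pvHB n x j < n := by
  unfold pvHB; split_ifs
  · exact pvIter_prev_lt hn _ h
  · exact pvIter_next_lt hn _ h

theorem pvIter_prev_fix {n i : Nat} (hn : 2 ≤ n) (h : i < n) {m : Nat}
    (hfix : (pvNextPos n)^[m] i = i) : (pvPrev n)^[m] i = i := by
  conv_lhs => rw [← hfix]
  exact pvCancelGF hn m h

-- pvHB is a left inverse of pvQA on [0, n)
theorem pvHB_pvQA {n : Nat} (hn : 2 ≤ n) {i : Nat} (h : i < n) {x : Int} (hx : x ≠ 0) :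
    pvHB n x (pvQA n x i) = i := by
  obtain ⟨hp, hfixp⟩ := pvPer_spec hn h
  set p := pvPer n i with hpdef
  set r := (PySem.Int.mod x (p : Int)).toNat with hrdef
  have hrc : (r : Int) = x % (p : Int) := pvMod_toNat_cast hp
  unfold pvHB pvQA
  split_ifs with hpos
  · -- 0 < x : (pvPrev)^[x.toNat] (F^[r] i) = i
    have hrle : r ≤ x.toNat := by
      have h1 : (r : Int) ≤ x := by
        rw [hrc, Int.emod_def]
        have : 0 ≤ x / (p : Int) := Int.ediv_nonneg hpos.le (by positivity)
        nlinarith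
      omega
    obtain ⟨k, hk⟩ : ∃ k, x.toNat - r = k * p := by
      have hdiv : 0 ≤ x / (p : Int) := Int.ediv_nonneg hpos.le (by positivity)
      refine ⟨(x / (p : Int)).toNat, ?_⟩
      apply Nat.cast_injective (R := Int)
      push_cast [hrle]
      rw [Int.toNat_of_nonneg hdiv, Int.toNat_of_nonneg hpos.le, hrc, Int.emod_def]
      ring
    have hsplit : x.toNat = (x.toNat - r) + r := by omega
    rw [← hpdef, ← hrdef, hsplit, Function.iterate_add_apply,
      pvCancelGF hn r h, hk, pvIter_mul_fix (pvIter_prev_fix hn h hfixp)]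
  · -- x < 0 : F^[(-x).toNat] (F^[r] i) = i
    have hneg : x < 0 := by omega
    obtain ⟨k, hk⟩ : ∃ k, (-x).toNat + r = k * p := by
      have hd : x / (p : Int) ≤ 0 := pvEdiv_nonpos hneg (by positivity)
      refine ⟨(-(x / (p : Int))).toNat, ?_⟩
      apply Nat.cast_injective (R := Int)
      push_cast
      rw [Int.toNat_of_nonneg (by omega : (0:Int) ≤ -(x / (p : Int))),
        Int.toNat_of_nonneg (by omega : (0:Int) ≤ -x), hrc, Int.emod_def]
      ring
    rw [← hpdef, ← hrdef, ← Function.iterate_add_apply, hk,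
      pvIter_mul_fix hfixp]

-- period transfer along the orbit
theorem pvPeriod_transfer {n : Nat} (hn : 2 ≤ n) {p e m : Nat} (hp : p < n)
    (hfix : (pvNextPos n)^[m] ((pvNextPos n)^[e] p) = (pvNextPos n)^[e] p) :
    (pvNextPos n)^[m] p = p := by
  have hcomm : (pvNextPos n)^[e] ((pvNextPos n)^[m] p) = (pvNextPos n)^[e] p := by
    rw [← Function.iterate_add_apply, Nat.add_comm, Function.iterate_add_apply, hfix]
  have := congrArg ((pvPrev n)^[e]) hcomm
  rwa [pvCancelGF hn e (pvIter_next_lt hn m hp), pvCancelGF hn e hp] at this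

-- pvHB is a right inverse of pvQA on [0, n)
theorem pvQA_pvHB {n : Nat} (hn : 2 ≤ n) {j : Nat} (h : j < n) {x : Int} (hx : x ≠ 0) :
    pvQA n x (pvHB n x j) = j := by
  unfold pvHB
  split_ifs with hpos
  · -- i := G^[x.toNat] j
    set i := (pvPrev n)^[x.toNat] j with hidef
    have hi : i < n := pvIter_prev_lt hn _ h
    obtain ⟨hp, hfixp⟩ := pvPer_spec hn hi
    have hmods : (PySem.Int.mod x (pvPer n i : Int)).toNat % pvPer n i
        = x.toNat % pvPer n i := by
      apply Nat.cast_injective (R := Int)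
      push_cast [Int.toNat_of_nonneg hpos.le]
      rw [pvMod_toNat_cast hp, Int.emod_emod_of_dvd x dvd_rfl]
    unfold pvQA
    rw [pvIter_mod_period hfixp hmods, hidef, pvCancelFG hn _ h]
  · have hneg : x < 0 := by omega
    set e := (-x).toNat with hedef
    set i := (pvNextPos n)^[e] j with hidef
    have hi : i < n := pvIter_next_lt hn _ h
    obtain ⟨hp, hfixp⟩ := pvPer_spec hn hi
    have hfixj : (pvNextPos n)^[pvPer n i] j = j := pvPeriod_transfer hn h (hidef ▸ hfixp)
    set r := (PySem.Int.mod x (pvPer n i : Int)).toNat with hrdef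
    have hrc : (r : Int) = x % (pvPer n i : Int) := pvMod_toNat_cast hp
    obtain ⟨k, hk⟩ : ∃ k, r + e = k * pvPer n i := by
      have hd : x / (pvPer n i : Int) ≤ 0 := pvEdiv_nonpos hneg (by positivity)
      refine ⟨(-(x / (pvPer n i : Int))).toNat, ?_⟩
      apply Nat.cast_injective (R := Int)
      push_cast
      rw [Int.toNat_of_nonneg (by omega : (0:Int) ≤ -(x / (pvPer n i : Int))),
        Int.toNat_of_nonneg (by omega : (0:Int) ≤ -x), hrc, Int.emod_def]
      ring
    unfold pvQA
    rw [← hrdef, hidef, ← Function.iterate_add_apply, hk, pvIter_mul_fix hfixj]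

-- ---------- generic facts about foldl-of-set write loops ----------
theorem pvSet_getD_ne {α} (l : List α) (i p : Nat) (v : α) (h : i ≠ p) (d : α) :
    (l.set i v).getD p d = l.getD p d := by
  simp [List.getD_eq_getElem?_getD, List.getElem?_set_ne h]

theorem pvSet_getD_eq {α} (l : List α) (i : Nat) (v : α) (h : i < l.length) (d : α) :
    (l.set i v).getD i d = v := by
  simp [List.getD_eq_getElem?_getD, List.getElem?_set_self, h]

theorem pvGetD_map_range {α} (n j : Nat) (f : Nat → α) (h : j < n) (d : α) :
    ((List.range n).map f).getD j d = f j := by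
  simp [List.getD_eq_getElem?_getD, List.getElem?_map, List.getElem?_range, h]

theorem pvFoldl_set_length {α β} (L : List β) (pos : β → Nat) (val : β → α) (r : List α) :
    (L.foldl (fun a pv => a.set (pos pv) (val pv)) r).length = r.length := by
  induction L generalizing r with
  | nil => rfl
  | cons q t ih => simp [List.foldl_cons, ih]

theorem pvFoldl_set_getD_not_mem {α β} (L : List β) (pos : β → Nat) (val : β → α)
    (r : List α) (p : Nat) (d : α) :
    (∀ q ∈ L, pos q ≠ p) →
    (L.foldl (fun a pv => a.set (pos pv) (val pv)) r).getD p d = r.getD p d := by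
  induction L generalizing r with
  | nil => intro _; rfl
  | cons q t ih =>
    intro hp
    rw [List.foldl_cons, ih _ (fun q' hq' => hp q' (List.mem_cons_of_mem _ hq')),
      pvSet_getD_ne _ _ _ _ (hp q List.mem_cons_self)]

theorem pvFoldl_set_getD_mem {α β} (L : List β) (pos : β → Nat) (val : β → α)
    (r : List α) (d : α) (q0 : β) :
    (L.map pos).Nodup → (∀ q ∈ L, pos q < r.length) → q0 ∈ L →
    (L.foldl (fun a pv => a.set (pos pv) (val pv)) r).getD (pos q0) d = val q0 := by
  induction L generalizing r with
  | nil => intro _ _ h; simp at h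
  | cons q t ih =>
    intro hnd hlt hq0
    rw [List.foldl_cons]
    rw [List.map_cons, List.nodup_cons] at hnd
    rcases List.mem_cons.1 hq0 with rfl | hmem
    · have hnot : ∀ q' ∈ t, pos q' ≠ pos q0 := by
        intro q' hq' he
        have hm := List.mem_map_of_mem (f := pos) hq'
        rw [he] at hm
        exact hnd.1 hm
      rw [pvFoldl_set_getD_not_mem _ _ _ _ _ _ hnot,
        pvSet_getD_eq _ _ _ (hlt q0 List.mem_cons_self)]
    · have hnd' : (t.map pos).Nodup := hnd.2
      have hlt' : ∀ q' ∈ t, pos q' < (r.set (pos q) (val q)).length := by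
        intro q' hq'; simpa using hlt q' (List.mem_cons_of_mem _ hq')
      exact ih _ hnd' hlt' hmem

-- marking loop: getD after setting a list of positions to true
theorem pvFoldl_set_true_getD (L : List Nat) (v : List Bool) (j : Nat) :
    (∀ i ∈ L, i < v.length) →
    (L.foldl (fun a i => a.set i true) v).getD j true
      = (v.getD j true || decide (j ∈ L)) := by
  induction L generalizing v with
  | nil => intro _; simp
  | cons i t ih =>
    intro hall
    rw [List.foldl_cons, ih _ (fun i' hi' => by
      simpa using hall i' (List.mem_cons_of_mem _ hi'))]
    by_cases hji : j = i
    · subst hji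
      rw [pvSet_getD_eq _ _ _ (hall j List.mem_cons_self)]
      simp
    · rw [pvSet_getD_ne _ _ _ _ (Ne.symm hji)]
      simp [List.mem_cons, hji]

theorem pvFoldl_set_true_length (L : List Nat) (v : List Bool) :
    (L.foldl (fun a i => a.set i true) v).length = v.length := by
  induction L generalizing v with
  | nil => rfl
  | cons i t ih => simp [List.foldl_cons, ih]

-- ---------- characterization of A's while loop (pvCollect) ----------
def pvCyc (n start m : Nat) : List Nat := (List.range m).map (fun j => (pvNextPos n)^[j] start)

def pvVisK (n start : Nat) (vis0 : List Bool) (m : Nat) : List Bool :=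
  (pvCyc n start m).foldl (fun v i => v.set i true) vis0

def pvClosed (n : Nat) (vis : List Bool) : Prop :=
  ∀ j, j < n → vis.getD j true = true → vis.getD (pvPrev n j) true = true

theorem pvCyc_lt {n start m : Nat} (hn : 2 ≤ n) (hs : start < n) :
    ∀ i ∈ pvCyc n start m, i < n := by
  intro i hi
  obtain ⟨j, hjr, rfl⟩ := List.mem_map.1 hi
  exact pvIter_next_lt hn j hs

theorem pvVisK_length {n start m : Nat} (vis0 : List Bool) :
    (pvVisK n start vis0 m).length = vis0.length := pvFoldl_set_true_length _ _

theorem pvVisK_getD {n start m : Nat} (hn : 2 ≤ n) (hs : start < n) (vis0 : List Bool)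
    (hlen : vis0.length = n) (j : Nat) :
    (pvVisK n start vis0 m).getD j true
      = (vis0.getD j true || decide (j ∈ pvCyc n start m)) := by
  exact pvFoldl_set_true_getD _ _ _ (fun i hi => hlen ▸ pvCyc_lt hn hs i hi)

-- iterated back-closure: a closed visited set containing a forward iterate contains the start
theorem pvClosed_back {n : Nat} (hn : 2 ≤ n) {vis : List Bool} (hcl : pvClosed n vis)
    {start : Nat} (hs : start < n) (k : Nat)
    (h : vis.getD ((pvNextPos n)^[k] start) true = true) : vis.getD start true = true := by
  induction k with
  | zero => simpa using h
  | succ k ih =>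
    apply ih
    have hk : (pvNextPos n)^[k] start < n := pvIter_next_lt hn k hs
    have := hcl _ (pvIter_next_lt hn (k+1) hs) h
    rwa [Function.iterate_succ_apply' (pvNextPos n), pvPrev_next hk] at this

-- cancellation of equal iterates
theorem pvIter_cancel {n : Nat} (hn : 2 ≤ n) {start : Nat} (hs : start < n) {j k : Nat}
    (hjk : j ≤ k) (h : (pvNextPos n)^[k] start = (pvNextPos n)^[j] start) :
    (pvNextPos n)^[k - j] start = start := by
  have h1 : (pvNextPos n)^[j] ((pvNextPos n)^[k - j] start) = (pvNextPos n)^[j] start := by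
    rw [← Function.iterate_add_apply]
    have : j + (k - j) = k := by omega
    rw [this, h]
  have h2 := congrArg ((pvPrev n)^[j]) h1
  rwa [pvCancelGF hn j (pvIter_next_lt hn _ hs), pvCancelGF hn j hs] at h2

theorem pvCollect_spec {n : Nat} (hn : 2 ≤ n) (vis0 : List Bool) (hlen : vis0.length = n)
    (hcl : pvClosed n vis0) (start : Nat) (hs : start < n)
    (h0 : vis0.getD start true = false) :
    pvCollect (pvNextPos n) vis0 [] start
      = (pvVisK n start vis0 (pvPer n start), pvCyc n start (pvPer n start)) := by
  obtain ⟨hper, hfix⟩ := pvPer_spec hn hs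
  suffices H : ∀ d k, k + d = pvPer n start →
      pvCollect (pvNextPos n) (pvVisK n start vis0 k) (pvCyc n start k) ((pvNextPos n)^[k] start)
        = (pvVisK n start vis0 (pvPer n start), pvCyc n start (pvPer n start)) by
    have := H (pvPer n start) 0 (by omega)
    simpa [pvVisK, pvCyc] using this
  intro d
  induction d with
  | zero =>
    intro k hk
    have hk' : k = pvPer n start := by omega
    subst hk'
    rw [pvCollect, hfix]
    have hvis : (pvVisK n start vis0 (pvPer n start)).getD start true = true := by
      rw [pvVisK_getD hn hs vis0 hlen]
      have : start ∈ pvCyc n start (pvPer n start) := by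
        apply List.mem_map.2
        exact ⟨0, List.mem_range.2 hper, by simp⟩
      simp [this]
    rw [hvis]
    simp
  | succ d ih =>
    intro k hk
    have hklt : k < pvPer n start := by omega
    have hcur : (pvNextPos n)^[k] start < n := pvIter_next_lt hn k hs
    have hnotmem : (pvNextPos n)^[k] start ∉ pvCyc n start k := by
      intro hmem
      obtain ⟨j, hj, hje⟩ := List.mem_map.1 hmem
      rw [List.mem_range] at hj
      have := pvIter_cancel hn hs (by omega : j ≤ k) hje.symm
      exact pvPer_min hn hs (show k - j < pvPer n start by omega) ⟨by omega, this⟩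
    have hold : vis0.getD ((pvNextPos n)^[k] start) true = false := by
      by_contra hc
      have : vis0.getD ((pvNextPos n)^[k] start) true = true := by
        cases h : vis0.getD ((pvNextPos n)^[k] start) true
        · exact absurd h hc
        · rfl
      exact absurd (pvClosed_back hn hcl hs k this) (by rw [h0]; exact Bool.false_ne_true)
    have hcond : (pvVisK n start vis0 k).getD ((pvNextPos n)^[k] start) true = false := by
      rw [pvVisK_getD hn hs vis0 hlen, hold]
      simp [hnotmem]
    rw [pvCollect, hcond]
    have e1 : (pvVisK n start vis0 k).set ((pvNextPos n)^[k] start) true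
        = pvVisK n start vis0 (k + 1) := by
      unfold pvVisK pvCyc
      rw [List.range_succ, List.map_append, List.foldl_append]
      rfl
    have e2 : pvCyc n start k ++ [(pvNextPos n)^[k] start] = pvCyc n start (k + 1) := by
      unfold pvCyc
      rw [List.range_succ, List.map_append]
      rfl
    rw [e1, e2, ← Function.iterate_succ_apply' (pvNextPos n)]
    exact ih (k + 1) (by omega)

-- the enlarged visited set is still closed
theorem pvVisK_closed {n start : Nat} (hn : 2 ≤ n) (hs : start < n) (vis0 : List Bool)
    (hlen : vis0.length = n) (hcl : pvClosed n vis0) :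
    pvClosed n (pvVisK n start vis0 (pvPer n start)) := by
  obtain ⟨hper, hfix⟩ := pvPer_spec hn hs
  intro j hj hvj
  rw [pvVisK_getD hn hs vis0 hlen] at hvj ⊢
  rcases Bool.or_eq_true_iff.1 hvj with hv | hv
  · rw [hcl j hj hv]; simp
  · have hmem := of_decide_eq_true hv
    obtain ⟨k, hkr, rfl⟩ := List.mem_map.1 hmem
    have hk : k < pvPer n start := List.mem_range.1 hkr
    have hmem' : pvPrev n ((pvNextPos n)^[k] start) ∈ pvCyc n start (pvPer n start) := by
      cases k with
      | zero =>
        simp only [Function.iterate_zero_apply]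
        have : pvPrev n start = (pvNextPos n)^[pvPer n start - 1] start := by
          conv_lhs => rw [← hfix]
          have : pvPer n start = (pvPer n start - 1) + 1 := by omega
          rw [this, Function.iterate_succ_apply' (pvNextPos n), pvPrev_next
            (pvIter_next_lt hn _ hs)]
          simp
        rw [this]
        exact List.mem_map.2 ⟨_, List.mem_range.2 (by omega), rfl⟩
      | succ k' =>
        rw [Function.iterate_succ_apply' (pvNextPos n), pvPrev_next (pvIter_next_lt hn _ hs)]
        exact List.mem_map.2 ⟨_, List.mem_range.2 (by omega), rfl⟩
    simp [hmem']

-- ---------- the outer loop of A ----------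
theorem pvCyc_length (n start m : Nat) : (pvCyc n start m).length = m := by
  simp [pvCyc]

theorem pvZipIdx_cyc (n start m : Nat) :
    (pvCyc n start m).zipIdx = (List.range m).map (fun j => ((pvNextPos n)^[j] start, j)) := by
  unfold pvCyc
  rw [List.zipIdx_map]
  have : (List.range m).zipIdx = (List.range m).map (fun j => (j, j)) := by
    apply List.ext_getElem <;> simp
  rw [this, List.map_map]
  rfl

theorem pvStepA_eq_unvisited {n : Nat} (chars : List Char) (x : Int)
    (st : List (List Char) × List Bool) {t : Nat} (hn : 2 ≤ n) (ht : t < n)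
    (hvis : st.2.length = n) (hcl : pvClosed n st.2) (hv0 : st.2.getD t true = false) :
    pvStepA (pvNextPos n) chars x st t =
      ((List.range (pvPer n t)).foldl
        (fun r j => r.set
          ((pvCyc n t (pvPer n t)).getD
            ((j + (PySem.Int.mod x (pvPer n t : Int)).toNat) % pvPer n t) 0)
          [chars.getD ((pvNextPos n)^[j] t) ' ']) st.1,
       pvVisK n t st.2 (pvPer n t)) := by
  unfold pvStepA
  rw [if_neg (by rw [hv0]; exact Bool.false_ne_true)]
  simp only [pvCollect_spec hn st.2 hvis hcl t ht hv0, pvCyc_length, pvZipIdx_cyc,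
    List.foldl_map]

def pvInv (n : Nat) (chars : List Char) (x : Int) (t : Nat)
    (st : List (List Char) × List Bool) : Prop :=
  st.1.length = n ∧ st.2.length = n ∧ pvClosed n st.2 ∧
  (∀ s', s' < t → st.2.getD s' true = true) ∧
  (∀ p, p < n → st.1.getD p [] =
    if st.2.getD (pvHB n x p) true = true then [chars.getD (pvHB n x p) ' '] else [])

theorem pvStepA_inv {n : Nat} {chars : List Char} {x : Int} (hn : 2 ≤ n) (hx : x ≠ 0)
    {t : Nat} (ht : t < n) {st : List (List Char) × List Bool}
    (hinv : pvInv n chars x t st) :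
    pvInv n chars x (t + 1) (pvStepA (pvNextPos n) chars x st t) := by
  obtain ⟨hres, hvis, hcl, hpre, hchar⟩ := hinv
  by_cases hv : st.2.getD t true = true
  · unfold pvStepA
    rw [if_pos hv]
    refine ⟨hres, hvis, hcl, ?_, hchar⟩
    intro s' hs'
    rcases Nat.lt_or_ge s' t with h | h
    · exact hpre s' h
    · have he : s' = t := by omega
      subst he; exact hv
  · have hv0 : st.2.getD t true = false := by
      cases h : st.2.getD t true
      · rfl
      · exact absurd h hv
    rw [pvStepA_eq_unvisited chars x st hn ht hvis hcl hv0]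
    obtain ⟨hper, hfix⟩ := pvPer_spec hn ht
    set m := pvPer n t with hmdef
    set shift := (PySem.Int.mod x (m : Int)).toNat with hshiftdef
    -- the write position of index j is pvQA of the j-th cycle element
    have hfixj : ∀ j, (pvNextPos n)^[m] ((pvNextPos n)^[j] t) = (pvNextPos n)^[j] t := by
      intro j
      rw [← Function.iterate_add_apply, Nat.add_comm, Function.iterate_add_apply, hfix]
    have hpos : ∀ j, j < m →
        (pvCyc n t m).getD ((j + shift) % m) 0 = pvQA n x ((pvNextPos n)^[j] t) := by
      intro j hj
      unfold pvCyc
      rw [pvGetD_map_range _ _ _ (Nat.mod_lt _ hper)]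
      rw [pvIter_mod_period hfix (Nat.mod_mod_of_dvd _ dvd_rfl)]
      rw [Nat.add_comm, Function.iterate_add_apply]
      exact pvQA_eq_of_period hn (pvIter_next_lt hn j ht) hper (hfixj j) x
    -- positions are distinct
    have hinj : ∀ j ∈ List.range m, ∀ j' ∈ List.range m,
        pvQA n x ((pvNextPos n)^[j] t) = pvQA n x ((pvNextPos n)^[j'] t) → j = j' := by
      intro j hj j' hj' he
      rw [List.mem_range] at hj hj'
      have he2 : (pvNextPos n)^[j] t = (pvNextPos n)^[j'] t := by
        have h1 := congrArg (pvHB n x) he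
        rwa [pvHB_pvQA hn (pvIter_next_lt hn j ht) hx,
          pvHB_pvQA hn (pvIter_next_lt hn j' ht) hx] at h1
      by_contra hne
      rcases Nat.lt_or_ge j j' with hlt | hge
      · have := pvIter_cancel hn ht hlt.le he2.symm
        exact pvPer_min hn ht (show j' - j < m by omega) ⟨by omega, this⟩
      · have hlt : j' < j := by omega
        have := pvIter_cancel hn ht hlt.le he2
        exact pvPer_min hn ht (show j - j' < m by omega) ⟨by omega, this⟩
    -- rewrite the fold so that the position function is uniform
    have hfold : (List.range m).foldl
        (fun r j => r.set ((pvCyc n t m).getD ((j + shift) % m) 0)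
          [chars.getD ((pvNextPos n)^[j] t) ' ']) st.1
        = (List.range m).foldl
        (fun r j => r.set (pvQA n x ((pvNextPos n)^[j] t))
          [chars.getD ((pvNextPos n)^[j] t) ' ']) st.1 := by
      apply PySem.List.foldl_congr_mem
      intro r j hj
      rw [hpos j (List.mem_range.1 hj)]
    rw [hfold]
    have hndpos : ((List.range m).map (fun j => pvQA n x ((pvNextPos n)^[j] t))).Nodup :=
      List.Nodup.map_on hinj List.nodup_range
    have hltpos : ∀ j ∈ List.range m, pvQA n x ((pvNextPos n)^[j] t) < st.1.length := by
      intro j hj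
      rw [hres]
      exact pvQA_lt hn (pvIter_next_lt hn j ht) x
    constructor
    · -- res length
      simpa using (pvFoldl_set_length (List.range m)
        (fun j => pvQA n x ((pvNextPos n)^[j] t))
        (fun j => [chars.getD ((pvNextPos n)^[j] t) ' ']) st.1).trans hres
    refine ⟨by simpa using (pvVisK_length st.2).trans hvis, pvVisK_closed hn ht st.2 hvis hcl, ?_, ?_⟩
    · -- prefix marked
      intro s' hs'
      rw [pvVisK_getD hn ht st.2 hvis]
      rcases Nat.lt_or_ge s' t with h | h
      · rw [hpre s' h]; simp
      · have he : s' = t := by omega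
        subst he
        have : s' ∈ pvCyc n s' m := by
          unfold pvCyc
          exact List.mem_map.2 ⟨0, List.mem_range.2 hper, by simp⟩
        simp [this]
    · -- characterization of res
      intro p hp
      have hbp : pvHB n x p < n := pvHB_lt hn hp x
      rw [pvVisK_getD hn ht st.2 hvis]
      by_cases hmem : pvHB n x p ∈ pvCyc n t m
      · obtain ⟨j, hjr, hje⟩ := List.mem_map.1 hmem
        have hj : j < m := List.mem_range.1 hjr
        have hqj : pvQA n x ((pvNextPos n)^[j] t) = p := by
          rw [hje, pvQA_pvHB hn hp hx]
        have := pvFoldl_set_getD_mem (List.range m)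
          (fun j => pvQA n x ((pvNextPos n)^[j] t))
          (fun j => [chars.getD ((pvNextPos n)^[j] t) ' ']) st.1 [] j hndpos hltpos hjr
        simp only at this
        rw [hqj] at this
        rw [this, hje]
        simp [hmem]
      · have hnot : ∀ j ∈ List.range m, pvQA n x ((pvNextPos n)^[j] t) ≠ p := by
          intro j hj he
          apply hmem
          have := congrArg (pvHB n x) he
          rw [pvHB_pvQA hn (pvIter_next_lt hn j ht) hx] at this
          rw [← this]
          unfold pvCyc
          exact List.mem_map.2 ⟨j, hj, rfl⟩
        rw [pvFoldl_set_getD_not_mem (List.range m)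
          (fun j => pvQA n x ((pvNextPos n)^[j] t))
          (fun j => [chars.getD ((pvNextPos n)^[j] t) ' ']) st.1 p [] hnot]
        rw [hchar p hp]
        simp [hmem]

-- ---------- A's full characterization ----------
theorem pvFlatten_singleton {α β} (l : List α) (f : α → β) :
    (l.map (fun p => [f p])).flatten = l.map f := by
  induction l with
  | nil => rfl
  | cons a t ih => simp [ih]

theorem pvGetD_replicate {α} (n j : Nat) (d v : α) (h : j < n) :
    (List.replicate n v).getD j d = v := by
  simp [List.getD_eq_getElem?_getD, List.getElem?_replicate, h]

theorem pvA_loop_inv {n : Nat} {chars : List Char} {x : Int} (hn : 2 ≤ n) (hx : x ≠ 0) :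
    ∀ t, t ≤ n → pvInv n chars x t ((List.range t).foldl (pvStepA (pvNextPos n) chars x)
      (List.replicate n ([] : List Char), List.replicate n false)) := by
  intro t
  induction t with
  | zero =>
    intro _
    simp only [List.range_zero, List.foldl_nil]
    refine ⟨by simp, by simp, ?_, by omega, ?_⟩
    · intro j hj hvj
      rw [pvGetD_replicate n j true false hj] at hvj
      cases hvj
    · intro p hp
      have hb : pvHB n x p < n := pvHB_lt hn hp x
      rw [pvGetD_replicate n p [] [] hp, pvGetD_replicate n _ true false hb]
      simp
  | succ t ih =>
    intro ht
    rw [List.range_succ, List.foldl_append]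
    exact pvStepA_inv hn hx (by omega) (ih (by omega))

theorem pvA_char (s : String) (x : Int) (hn : 2 ≤ s.toList.length) (hx : x ≠ 0) :
    string_func s x = String.mk ((List.range s.toList.length).map
      (fun p => s.toList.getD (pvHB s.toList.length x p) ' ')) := by
  simp only [string_func]
  rw [if_neg (by push_neg; exact ⟨by omega, hx⟩)]
  obtain ⟨hres, hvis, hcl, hpre, hchar⟩ := pvA_loop_inv (chars := s.toList) (x := x) hn hx
    s.toList.length (le_refl _)
  have hfin : ((List.range s.toList.length).foldl (pvStepA (pvNextPos s.toList.length) s.toList x)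
      (List.replicate s.toList.length ([] : List Char), List.replicate s.toList.length false)).1
      = (List.range s.toList.length).map
        (fun p => [s.toList.getD (pvHB s.toList.length x p) ' ']) := by
    apply List.ext_getElem
    · rw [hres]; simp
    · intro i h1 h2
      have hi : i < s.toList.length := hres ▸ h1
      have hthis := hchar i hi
      rw [hpre _ (pvHB_lt hn hi x)] at hthis
      rw [if_pos rfl] at hthis
      rw [List.getElem_map, List.getElem_range]
      rw [← hthis, List.getD_eq_getElem]
  rw [hfin, pvFlatten_singleton]

-- ---------- B's characterization ----------
theorem pvGetD_map {α β} (l : List α) (f : α → β) (j : Nat) (d : β) (d' : α)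
    (h : j < l.length) : (l.map f).getD j d = f (l.getD j d') := by
  simp [List.getD_eq_getElem?_getD, List.getElem?_map, h, List.getElem?_eq_getElem,
    List.getD_eq_getElem]

theorem pvBpow_spec {n : Nat} :
    ∀ e (F : Nat → Nat) (t u : List Nat), (∀ j, j < n → F j < n) → t.length = n →
    (∀ j, j < n → t.getD j 0 = F j) →
    (∀ v ∈ u, v < n) → pvBpow t u e = u.map (fun v => F^[e] v) := by
  intro e
  induction e using Nat.strong_induction_on with
  | _ e ih =>
    intro F t u hF htlen htch hu
    rw [pvBpow]
    by_cases he : e = 0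
    · subst he
      simp
    · rw [dif_neg he]
      have hlen2 : (pvComp t t).length = n := by simp [pvComp, htlen]
      have hch2 : ∀ j, j < n → (pvComp t t).getD j 0 = F (F j) := by
        intro j hj
        unfold pvComp
        rw [pvGetD_map t _ j 0 0 (by omega), htch j hj, htch (F j) (hF j hj)]
      have hF2 : ∀ j, j < n → F (F j) < n := fun j hj => hF _ (hF j hj)
      have hu' : ∀ v ∈ (if e % 2 = 1 then pvComp t u else u), v < n := by
        split_ifs
        · intro v hv
          obtain ⟨w, hw, rfl⟩ := List.mem_map.1 hv
          rw [htch w (hu w hw)]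
          exact hF w (hu w hw)
        · exact hu
      rw [ih (e / 2) (Nat.div_lt_self (Nat.pos_of_ne_zero he) one_lt_two) _ _ _ hF2 hlen2
        hch2 hu']
      have hcompu : pvComp t u = u.map F := by
        unfold pvComp
        apply List.map_congr_left
        intro v hv
        exact htch v (hu v hv)
      have htwo : (fun v => F (F v)) = F^[2] := by
        funext v
        simp [Function.iterate_succ_apply']
      by_cases hodd : e % 2 = 1
      · rw [if_pos hodd, hcompu, List.map_map]
        apply List.map_congr_left
        intro v _
        simp only [Function.comp_apply, htwo, ← Function.iterate_mul]
        rw [← Function.iterate_succ_apply]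
        congr 1
        omega
      · rw [if_neg hodd]
        apply List.map_congr_left
        intro v _
        simp only [htwo, ← Function.iterate_mul]
        congr 1
        omega

theorem pvB_char (s : String) (x : Int) (hn : 2 ≤ s.toList.length) (hx : x ≠ 0) :
    string_func_alt s x = String.mk ((List.range s.toList.length).map
      (fun p => s.toList.getD (pvHB s.toList.length x p) ' ')) := by
  set n := s.toList.length with hndef
  simp only [string_func_alt]
  rw [if_neg (by push_neg; exact ⟨by omega, hx⟩)]
  set perm := (List.range n).map
    (fun i => if i < n / 2 then 2 * i + 1 else 2 * (n - 1 - i)) with hpermdef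
  have hpermch : ∀ j, j < n → perm.getD j 0 = pvNextPos n j := by
    intro j hj
    rw [hpermdef, pvGetD_map_range n j _ hj]
    rfl
  have hrangemem : ∀ v ∈ List.range n, v < n := fun v hv => List.mem_range.1 hv
  by_cases hxpos : 0 < x
  · rw [if_pos hxpos]
    -- the inverse table computes pvPrev
    have hfold : (List.range n).foldl (fun t i => t.set (perm.getD i 0) i)
        (List.replicate n 0)
        = (List.range n).foldl (fun t i => t.set (pvNextPos n i) i) (List.replicate n 0) := by
      apply PySem.List.foldl_congr_mem
      intro acc i hi
      rw [hpermch i (List.mem_range.1 hi)]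
    have hinvlen : ((List.range n).foldl (fun t i => t.set (pvNextPos n i) i)
        (List.replicate n 0)).length = n := by
      simpa using pvFoldl_set_length (List.range n) (fun i => pvNextPos n i) (fun i => i)
        (List.replicate n 0)
    have hinvch : ∀ j, j < n → ((List.range n).foldl (fun t i => t.set (pvNextPos n i) i)
        (List.replicate n 0)).getD j 0 = pvPrev n j := by
      intro j hj
      have hnd : ((List.range n).map (fun i => pvNextPos n i)).Nodup := by
        apply List.Nodup.map_on _ List.nodup_range
        intro a ha b hb he
        have h1 := congrArg (pvPrev n) he
        rwa [pvPrev_next (List.mem_range.1 ha), pvPrev_next (List.mem_range.1 hb)] at h1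
      have hlt : ∀ i ∈ List.range n, pvNextPos n i < (List.replicate n (0:Nat)).length := by
        intro i hi
        simpa using pvNext_lt hn (List.mem_range.1 hi)
      have := pvFoldl_set_getD_mem (List.range n) (fun i => pvNextPos n i) (fun i => i)
        (List.replicate n 0) 0 (pvPrev n j) hnd hlt
        (List.mem_range.2 (pvPrev_lt hn hj))
      simp only at this
      rwa [pvNext_prev hj] at this
    rw [hfold]
    rw [pvBpow_spec x.toNat (pvPrev n) _ _ (fun j hj => pvPrev_lt hn hj) hinvlen hinvch
      hrangemem]
    rw [List.map_map]
    congr 1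
    apply List.map_congr_left
    intro p hp
    simp only [Function.comp_apply]
    rw [pvHB, if_pos hxpos]
  · rw [if_neg hxpos]
    rw [pvBpow_spec (-x).toNat (pvNextPos n) _ _ (fun j hj => pvNext_lt hn hj)
      (by simp [hpermdef]) hpermch hrangemem]
    rw [List.map_map]
    congr 1
    apply List.map_congr_left
    intro p hp
    simp only [Function.comp_apply]
    rw [pvHB, if_neg hxpos]

-- ===== VERDICT (by name: the statement is the Claim_ definition above) =====
theorem string_func_spec : Claim_equal_string_func := by
  intro s x _
  unfold Spec_string_func
  by_cases hc : s.toList.length ≤ 1 ∨ x = 0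
  · simp only [string_func, string_func_alt]
    rw [if_pos hc, if_pos hc]
  · have h1 : 2 ≤ s.toList.length := by
      rcases Nat.lt_or_ge s.toList.length 2 with h | h
      · exact absurd (Or.inl (by omega)) hc
      · exact h
    have h2 : x ≠ 0 := fun he => hc (Or.inr he)
    rw [pvA_char s x h1 h2, pvB_char s x h1 h2]
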